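-- pv_equiv track=rewrite | github.com/dshemetov/leetcode | python/problems.py | p1340
-- ===== SOURCE A (Python) =====
-- def p1340(arr: list[int], d: int) -> int:
--     """
--     1340. Jump Game V https://leetcode.com/problems/jump-game-v/
--
--     Lessons learned:
--     - I solved this using a DFS and DP. The problem structure is
--
--         dp[i] = 1 + max(dp[j] for j in possible_jumps[i])   if possible_jumps[i] is not empty
--               = 1                                           else
--
--         possible_jumps[i] = {j: max(i - d, 0) <= j <= min(i + d, n) and arr[j] < arr[i]}
--
--     where n = len(arr). This lends itself well to a recursive DFS solution.
--
--     Examples: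
--     >>> p1340([6,4,14,6,8,13,9,7,10,6,12], 2)
--     4
--     >>> p1340([3,3,3,3,3], 3)
--     1
--     >>> p1340([7,6,5,4,3,2,1], 1)
--     7
--     """
--     if len(arr) == 1:
--         return 1
--
--     dp = [-1] * len(arr)
--
--     def dfs(i: int):
--         if dp[i] > -1:
--             return dp[i]
--
--         max_visits = 0
--         for i_ in range(i + 1, i + d + 1):
--             if not 0 <= i_ < len(arr) or not arr[i] > arr[i_]:
--                 break
--             dfs(i_)
--             max_visits = max(max_visits, dp[i_])
--
--         for i_ in range(i - 1, i - d - 1, -1):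
--             if not 0 <= i_ < len(arr) or not arr[i] > arr[i_]:
--                 break
--             dfs(i_)
--             max_visits = max(max_visits, dp[i_])
--
--         dp[i] = 1 + max_visits
--
--     for i in range(len(arr)):
--         dfs(i)
--
--     return max(dp)
-- ===== SOURCE B (Python) =====
-- def p1340(arr: list[int], d: int) -> int:
--     # Bottom-up DP: process indices in increasing order of value, so every
--     # reachable (strictly lower) index already holds its final dp value.
--     n = len(arr)
--     dp = [1] * n
--     for i in sorted(range(n), key=lambda k: arr[k]):
--         best = 0
--         j = i + 1
--         while j < n and j <= i + d and arr[j] < arr[i]: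
--             best = max(best, dp[j])
--             j += 1
--         j = i - 1
--         while j >= 0 and j >= i - d and arr[j] < arr[i]:
--             best = max(best, dp[j])
--             j -= 1
--         dp[i] = 1 + best
--     return max(dp)
-- ===== Notes on version B (the rewrite author's own statement) =====
-- stated objective: alternative
-- what changed: Replaces A's memoized recursive DFS over a -1-initialized memo table with an iterative bottom-up DP that processes indices sorted by increasing value, so every reachable lower index already holds its final dp value when read.
import Mathlib
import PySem

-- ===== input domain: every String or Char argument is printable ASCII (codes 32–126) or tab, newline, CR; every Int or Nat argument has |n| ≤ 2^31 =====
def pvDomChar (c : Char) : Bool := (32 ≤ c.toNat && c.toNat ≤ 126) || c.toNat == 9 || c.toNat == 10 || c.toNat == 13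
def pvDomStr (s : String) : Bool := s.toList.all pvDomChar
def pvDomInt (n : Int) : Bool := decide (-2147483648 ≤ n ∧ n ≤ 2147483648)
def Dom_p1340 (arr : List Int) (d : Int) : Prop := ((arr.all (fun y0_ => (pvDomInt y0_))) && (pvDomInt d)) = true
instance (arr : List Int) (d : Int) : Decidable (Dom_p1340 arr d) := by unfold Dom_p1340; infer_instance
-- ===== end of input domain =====

-- B replaces A's memoized recursive DFS by a bottom-up DP that processes indices sorted by value (alternative decomposition, same asymptotic cost).

-- ===== PORT A =====
-- first inner loop of dfs: the indices it visits before `break`; the range bound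
-- i+d+1 of `range(i+1, i+d+1)` is carried as the step counter `steps = d.toNat`
-- (that range has max(d,0) elements), which is exact.
def p1340_reachR (arr : List Int) (i : Nat) : Nat → Nat → List Nat
  | 0, _ => []
  | steps+1, j =>
    if j < arr.length ∧ arr.getD i 0 > arr.getD j 0 then
      j :: p1340_reachR arr i steps (j+1)
    else []

-- second inner loop `range(i-1, i-d-1, -1)`: again max(d,0) steps, j runs over Int.
def p1340_reachL (arr : List Int) (i : Nat) : Nat → Int → List Nat
  | 0, _ => []
  | steps+1, j =>
    if 0 ≤ j ∧ j < (arr.length : Int) ∧ arr.getD i 0 > arr.getD j.toNat 0 then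
      j.toNat :: p1340_reachL arr i steps (j-1)
    else []

-- the memoized `dfs`, state-passing: `dp` is the mutated list, `fuel` bounds the
-- recursion depth (Python needs none; depth ≤ number of strictly smaller values,
-- so the fuel arr.length+1 passed below never runs out — proved in the lemmas).
def p1340_dfs (arr : List Int) (d : Int) : Nat → List Int → Nat → List Int
  | 0, dp, _ => dp
  | fuel+1, dp, i =>
    if dp.getD i (-1) > -1 then dp
    else
      let js := p1340_reachR arr i d.toNat (i+1) ++ p1340_reachL arr i d.toNat ((i : Int) - 1)
      let r := js.foldl (fun (st : List Int × Int) j =>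
        let dp' := p1340_dfs arr d fuel st.1 j
        (dp', max st.2 (dp'.getD j (-1)))) (dp, 0)
      r.1.set i (1 + r.2)

def p1340 (arr : List Int) (d : Int) : Int :=
  if arr.length == 1 then 1
  else
    let dp0 : List Int := List.replicate arr.length (-1)
    let dp := (List.range arr.length).foldl (fun dp i => p1340_dfs arr d (arr.length + 1) dp i) dp0
    (PySem.List.max? dp (fun y => y)).getD 0   -- max(dp); [] (max of empty raises) is outside Pre_

-- ===== PORT B =====
-- right while-loop of Source B; the bound `j <= i + d` is carried as `steps = d.toNat`, exact as above.
def p1340_scanR (arr : List Int) (dp : List Int) (i : Nat) : Nat → Nat → Int → Int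
  | 0, _, best => best
  | steps+1, j, best =>
    if j < arr.length ∧ arr.getD j 0 < arr.getD i 0 then
      p1340_scanR arr dp i steps (j+1) (max best (dp.getD j 1))
    else best

-- left while-loop of Source B (`j >= i - d` carried as `steps = d.toNat`).
def p1340_scanL (arr : List Int) (dp : List Int) (i : Nat) : Nat → Int → Int → Int
  | 0, _, best => best
  | steps+1, j, best =>
    if 0 ≤ j ∧ arr.getD j.toNat 0 < arr.getD i 0 then
      p1340_scanL arr dp i steps (j-1) (max best (dp.getD j.toNat 1))
    else best

-- loop body of Source B's for-loop
def p1340_step (arr : List Int) (d : Int) (dp : List Int) (i : Nat) : List Int :=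
  let best := p1340_scanR arr dp i d.toNat (i+1) 0
  let best := p1340_scanL arr dp i d.toNat ((i : Int) - 1) best
  dp.set i (1 + best)

def p1340_alt (arr : List Int) (d : Int) : Int :=
  let order := PySem.List.sorted (List.range arr.length) (fun k => arr.getD k 0) false
  let dp := order.foldl (p1340_step arr d) (List.replicate arr.length 1)
  (PySem.List.max? dp (fun y => y)).getD 0   -- max(dp)

-- ===== PRECONDITION & SPEC =====
-- Pre_ excludes only the empty list, on which Python A raises ValueError (max of empty sequence).
def Pre_p1340 (arr : List Int) (d : Int) : Prop := arr ≠ []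
instance (arr : List Int) (d : Int) : Decidable (Pre_p1340 arr d) := by unfold Pre_p1340; infer_instance
def pvWitness_p1340 : List Int × Int := ([1, 2], 1)

def Spec_p1340 (arr : List Int) (d : Int) (out : Int) : Prop := out = p1340_alt arr d
instance (arr : List Int) (d : Int) (out : Int) : Decidable (Spec_p1340 arr d out) := by unfold Spec_p1340; infer_instance

-- ===== CLAIM (what is proved, stated in full; the proofs are below) =====
def Claim_equal_p1340 : Prop := ∀ (arr : List Int) (d : Int), Dom_p1340 arr d → Pre_p1340 arr d → Spec_p1340 arr d (p1340 arr d)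

-- ===== LEMMAS AND PROOFS =====

-- indices visited by the scans are in range and strictly smaller in value
theorem p1340_mem_reachR (arr : List Int) (i : Nat) :
    ∀ (s : Nat) (j0 : Nat) (j : Nat), j ∈ p1340_reachR arr i s j0 →
      j < arr.length ∧ arr.getD j 0 < arr.getD i 0 := by
  intro s
  induction s with
  | zero => intro j0 j h; simp [p1340_reachR] at h
  | succ s ih =>
    intro j0 j h
    simp only [p1340_reachR] at h
    split at h
    · rename_i hc
      rcases List.mem_cons.1 h with rfl | h
      · exact ⟨hc.1, hc.2⟩
      · exact ih _ _ h
    · simp at h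

theorem p1340_mem_reachL (arr : List Int) (i : Nat) :
    ∀ (s : Nat) (j0 : Int) (j : Nat), j ∈ p1340_reachL arr i s j0 →
      j < arr.length ∧ arr.getD j 0 < arr.getD i 0 := by
  intro s
  induction s with
  | zero => intro j0 j h; simp [p1340_reachL] at h
  | succ s ih =>
    intro j0 j h
    simp only [p1340_reachL] at h
    split at h
    · rename_i hc
      rcases List.mem_cons.1 h with rfl | h
      · refine ⟨?_, hc.2.2⟩
        have := hc.2.1
        omega
      · exact ih _ _ h
    · simp at h

-- all indices one dfs call may visit from i
def pvReach (arr : List Int) (d : Int) (i : Nat) : List Nat :=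
  p1340_reachR arr i d.toNat (i+1) ++ p1340_reachL arr i d.toNat ((i : Int) - 1)

theorem pv_mem_reach (arr : List Int) (d : Int) (i j : Nat) (h : j ∈ pvReach arr d i) :
    j < arr.length ∧ arr.getD j 0 < arr.getD i 0 := by
  rcases List.mem_append.1 h with h | h
  · exact p1340_mem_reachR arr i _ _ _ h
  · exact p1340_mem_reachL arr i _ _ _ h

-- termination measure: number of indices with strictly smaller value
def pvM (arr : List Int) (i : Nat) : Nat :=
  ((Finset.range arr.length).filter (fun k => arr.getD k 0 < arr.getD i 0)).card

theorem pvM_lt (arr : List Int) (i j : Nat) (hj : j < arr.length)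
    (hv : arr.getD j 0 < arr.getD i 0) : pvM arr j < pvM arr i := by
  apply Finset.card_lt_card
  constructor
  · intro k hk
    simp only [Finset.mem_filter, Finset.mem_range] at *
    exact ⟨hk.1, lt_trans hk.2 hv⟩
  · intro hsub
    have hj' : j ∈ (Finset.range arr.length).filter (fun k => arr.getD k 0 < arr.getD i 0) := by
      simp only [Finset.mem_filter, Finset.mem_range]; exact ⟨hj, hv⟩
    have := hsub hj'
    simp only [Finset.mem_filter] at this
    exact absurd this.2 (lt_irrefl _)

-- the specification value: the dp recurrence both programs compute
def pvF (arr : List Int) (d : Int) (i : Nat) : Int :=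
  1 + ((pvReach arr d i).attach.map (fun j => pvF arr d j.1)).foldl max 0
termination_by pvM arr i
decreasing_by
  exact pvM_lt arr i j.1 (pv_mem_reach arr d i j.1 j.2).1 (pv_mem_reach arr d i j.1 j.2).2

theorem pvF_eq (arr : List Int) (d : Int) (i : Nat) :
    pvF arr d i = 1 + ((pvReach arr d i).map (pvF arr d)).foldl max 0 := by
  rw [pvF]
  congr 1
  simp

theorem pvF_pos (arr : List Int) (d : Int) (i : Nat) : 1 ≤ pvF arr d i := by
  rw [pvF_eq]
  have : (0 : Int) ≤ ((pvReach arr d i).map (pvF arr d)).foldl max 0 :=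
    (PySem.List.le_foldl_max _ _).1
  omega

-- getD / set / replicate bookkeeping
theorem pv_getD_set_self (dp : List Int) (i : Nat) (v dflt : Int) (h : i < dp.length) :
    (dp.set i v).getD i dflt = v := by
  simp [List.getD_eq_getElem?_getD, List.getElem?_set, h]

theorem pv_getD_set_ne (dp : List Int) (i k : Nat) (v dflt : Int) (h : k ≠ i) :
    (dp.set i v).getD k dflt = dp.getD k dflt := by
  simp [List.getD_eq_getElem?_getD, List.getElem?_set, Ne.symm h]

theorem pv_getD_replicate (n k : Nat) (v dflt : Int) (h : k < n) :
    (List.replicate n v).getD k dflt = v := by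
  simp [List.getD_eq_getElem?_getD, h]

theorem pvM_le (arr : List Int) (i : Nat) : pvM arr i ≤ arr.length := by
  calc pvM arr i ≤ (Finset.range arr.length).card := Finset.card_filter_le _ _
  _ = arr.length := Finset.card_range _

-- ===== A side: the memoized DFS computes pvF =====
def pvGood (arr : List Int) (d : Int) (dp : List Int) : Prop :=
  dp.length = arr.length ∧
  ∀ k, k < arr.length → dp.getD k (-1) = -1 ∨ dp.getD k (-1) = pvF arr d k

theorem p1340_fold_correct (arr : List Int) (d : Int) (fuel : Nat) (i : Nat)
    (hM : pvM arr i ≤ fuel)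
    (IH : ∀ (j : Nat) (dp : List Int), pvM arr j < fuel → j < arr.length → pvGood arr d dp →
      pvGood arr d (p1340_dfs arr d fuel dp j) ∧
      (p1340_dfs arr d fuel dp j).getD j (-1) = pvF arr d j ∧
      (∀ k, dp.getD k (-1) ≠ -1 → (p1340_dfs arr d fuel dp j).getD k (-1) = dp.getD k (-1))) :
    ∀ (l : List Nat) (dp : List Int) (mx : Int),
      (∀ j ∈ l, j < arr.length ∧ arr.getD j 0 < arr.getD i 0) → pvGood arr d dp →
      pvGood arr d (l.foldl (fun (st : List Int × Int) j =>
          (p1340_dfs arr d fuel st.1 j, max st.2 ((p1340_dfs arr d fuel st.1 j).getD j (-1)))) (dp, mx)).1 ∧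
      (l.foldl (fun (st : List Int × Int) j =>
          (p1340_dfs arr d fuel st.1 j, max st.2 ((p1340_dfs arr d fuel st.1 j).getD j (-1)))) (dp, mx)).2 = (l.map (pvF arr d)).foldl max mx ∧
      (∀ k, dp.getD k (-1) ≠ -1 → (l.foldl (fun (st : List Int × Int) j =>
          (p1340_dfs arr d fuel st.1 j, max st.2 ((p1340_dfs arr d fuel st.1 j).getD j (-1)))) (dp, mx)).1.getD k (-1) = dp.getD k (-1)) := by
  intro l
  induction l with
  | nil => intro dp mx _ hgood; exact ⟨hgood, rfl, fun k _ => rfl⟩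
  | cons j t iht =>
    intro dp mx hl hgood
    have hj := hl j (List.mem_cons_self ..)
    have hMj : pvM arr j < fuel := lt_of_lt_of_le (pvM_lt arr i j hj.1 hj.2) hM
    obtain ⟨g1, g2, g3⟩ := IH j dp hMj hj.1 hgood
    simp only [List.foldl_cons, List.map_cons]
    rw [g2]
    obtain ⟨h1, h2, h3⟩ := iht (p1340_dfs arr d fuel dp j) (max mx (pvF arr d j))
      (fun x hx => hl x (List.mem_cons_of_mem _ hx)) g1
    refine ⟨h1, h2, ?_⟩
    intro k hk
    rw [h3 k (by rw [g3 k hk]; exact hk), g3 k hk]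

theorem p1340_dfs_correct (arr : List Int) (d : Int) :
    ∀ (fuel : Nat) (i : Nat) (dp : List Int), pvM arr i < fuel → i < arr.length →
      pvGood arr d dp →
      pvGood arr d (p1340_dfs arr d fuel dp i) ∧
      (p1340_dfs arr d fuel dp i).getD i (-1) = pvF arr d i ∧
      (∀ k, dp.getD k (-1) ≠ -1 → (p1340_dfs arr d fuel dp i).getD k (-1) = dp.getD k (-1)) := by
  intro fuel
  induction fuel with
  | zero => intro i dp h; omega
  | succ fuel ih =>
    intro i dp hfuel hi hgood
    by_cases hmemo : dp.getD i (-1) > -1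
    · refine ⟨?_, ?_, ?_⟩ <;> simp only [p1340_dfs, if_pos hmemo]
      · exact hgood
      · rcases hgood.2 i hi with h | h
        · omega
        · exact h
      · exact fun k _ => trivial
    · have hM : pvM arr i ≤ fuel := by omega
      obtain ⟨f1, f2, f3⟩ := p1340_fold_correct arr d fuel i hM ih (pvReach arr d i) dp 0
        (fun j hj => pv_mem_reach arr d i j hj) hgood
      simp only [p1340_dfs, if_neg hmemo]
      set r := (pvReach arr d i).foldl (fun (st : List Int × Int) j =>
          (p1340_dfs arr d fuel st.1 j, max st.2 ((p1340_dfs arr d fuel st.1 j).getD j (-1)))) (dp, 0) with hr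
      rw [show (p1340_reachR arr i d.toNat (i + 1) ++ p1340_reachL arr i d.toNat ((i : Int) - 1)) = pvReach arr d i from rfl, ← hr]
      have hlen : r.1.length = arr.length := f1.1
      have hval : 1 + r.2 = pvF arr d i := by rw [f2, ← pvF_eq]
      refine ⟨⟨by rw [List.length_set, hlen], ?_⟩, ?_, ?_⟩
      · intro k hk
        by_cases hki : k = i
        · subst hki
          right
          rw [pv_getD_set_self _ _ _ _ (by omega), hval]
        · rw [pv_getD_set_ne _ _ _ _ _ hki]
          exact f1.2 k hk
      · rw [pv_getD_set_self _ _ _ _ (by omega), hval]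
      · intro k hk
        have hki : k ≠ i := by
          intro h; subst h
          rcases hgood.2 k hi with h | h
          · exact hk h
          · have := pvF_pos arr d k; omega
        rw [pv_getD_set_ne _ _ _ _ _ hki]
        exact f3 k hk

theorem p1340_loop_correct (arr : List Int) (d : Int) :
    ∀ (l : List Nat) (dp : List Int), (∀ i ∈ l, i < arr.length) → pvGood arr d dp →
      pvGood arr d (l.foldl (fun dp i => p1340_dfs arr d (arr.length + 1) dp i) dp) ∧
      (∀ k, dp.getD k (-1) ≠ -1 →
        (l.foldl (fun dp i => p1340_dfs arr d (arr.length + 1) dp i) dp).getD k (-1) = dp.getD k (-1)) ∧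
      (∀ i ∈ l, (l.foldl (fun dp i => p1340_dfs arr d (arr.length + 1) dp i) dp).getD i (-1) = pvF arr d i) := by
  intro l
  induction l with
  | nil => intro dp _ hgood; exact ⟨hgood, fun k _ => rfl, by simp⟩
  | cons i t iht =>
    intro dp hl hgood
    have hi : i < arr.length := hl i (List.mem_cons_self ..)
    obtain ⟨g1, g2, g3⟩ := p1340_dfs_correct arr d (arr.length + 1) i dp
      (by have := pvM_le arr i; omega) hi hgood
    simp only [List.foldl_cons]
    obtain ⟨h1, h2, h3⟩ := iht (p1340_dfs arr d (arr.length + 1) dp i)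
      (fun x hx => hl x (List.mem_cons_of_mem _ hx)) g1
    have hipres : (t.foldl (fun dp i => p1340_dfs arr d (arr.length + 1) dp i)
        (p1340_dfs arr d (arr.length + 1) dp i)).getD i (-1) = pvF arr d i := by
      rw [h2 i (by rw [g2]; have := pvF_pos arr d i; omega), g2]
    refine ⟨h1, ?_, ?_⟩
    · intro k hk
      rw [h2 k (by rw [g3 k hk]; exact hk), g3 k hk]
    · intro x hx
      rcases List.mem_cons.1 hx with rfl | hx
      · exact hipres
      · exact h3 x hx

theorem p1340_dpA (arr : List Int) (d : Int) :
    (List.range arr.length).foldl (fun dp i => p1340_dfs arr d (arr.length + 1) dp i)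
      (List.replicate arr.length (-1)) = (List.range arr.length).map (pvF arr d) := by
  have hgood : pvGood arr d (List.replicate arr.length (-1)) := by
    refine ⟨List.length_replicate, fun k hk => Or.inl ?_⟩
    exact pv_getD_replicate _ _ _ _ hk
  obtain ⟨h1, _, h3⟩ := p1340_loop_correct arr d (List.range arr.length)
    (List.replicate arr.length (-1)) (fun i hi => List.mem_range.1 hi) hgood
  apply List.ext_getElem
  · rw [h1.1]; simp
  · intro i hi hi'
    have hin : i < arr.length := by rw [h1.1] at hi; exact hi
    have := h3 i (List.mem_range.2 hin)
    rw [List.getD_eq_getElem _ _ hi] at this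
    rw [this]
    simp [hin]

-- ===== B side: the sorted bottom-up DP computes pvF =====
theorem p1340_scanR_eq (arr dp : List Int) (i : Nat) :
    ∀ (s j : Nat) (best : Int),
      p1340_scanR arr dp i s j best
        = (p1340_reachR arr i s j).foldl (fun b jj => max b (dp.getD jj 1)) best := by
  intro s
  induction s with
  | zero => intro j best; simp [p1340_scanR, p1340_reachR]
  | succ s ih =>
    intro j best
    by_cases hc : j < arr.length ∧ arr.getD j 0 < arr.getD i 0
    · rw [p1340_scanR, p1340_reachR, if_pos hc, if_pos (⟨hc.1, hc.2⟩ :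
        j < arr.length ∧ arr.getD i 0 > arr.getD j 0), List.foldl_cons, ih]
    · rw [p1340_scanR, p1340_reachR, if_neg hc, if_neg (fun h =>
        hc ⟨h.1, h.2⟩ : ¬(j < arr.length ∧ arr.getD i 0 > arr.getD j 0))]
      simp

theorem p1340_scanL_eq (arr dp : List Int) (i : Nat) :
    ∀ (s : Nat) (j : Int) (best : Int), j < (arr.length : Int) →
      p1340_scanL arr dp i s j best
        = (p1340_reachL arr i s j).foldl (fun b jj => max b (dp.getD jj 1)) best := by
  intro s
  induction s with
  | zero => intro j best _; simp [p1340_scanL, p1340_reachL]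
  | succ s ih =>
    intro j best hj
    by_cases hc : 0 ≤ j ∧ arr.getD j.toNat 0 < arr.getD i 0
    · rw [p1340_scanL, p1340_reachL, if_pos hc, if_pos (⟨hc.1, hj, hc.2⟩ :
        0 ≤ j ∧ j < (arr.length : Int) ∧ arr.getD i 0 > arr.getD j.toNat 0),
        List.foldl_cons, ih _ _ (by omega)]
    · rw [p1340_scanL, p1340_reachL, if_neg hc, if_neg (fun h =>
        hc ⟨h.1, h.2.2⟩ : ¬(0 ≤ j ∧ j < (arr.length : Int) ∧ arr.getD i 0 > arr.getD j.toNat 0))]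
      simp

def pvInvB (arr : List Int) (d : Int) (done : List Nat) (dp : List Int) : Prop :=
  dp.length = arr.length ∧
  ∀ k, k < arr.length → dp.getD k 1 = if k ∈ done then pvF arr d k else 1

theorem p1340_foldB (arr : List Int) (d : Int) (order : List Nat)
    (hmem : ∀ k, k < arr.length → k ∈ order)
    (hpair : order.Pairwise (fun a b => arr.getD a 0 ≤ arr.getD b 0))
    (hsub : ∀ k ∈ order, k < arr.length) :
    ∀ (todo done : List Nat) (dp : List Int), order = done ++ todo → pvInvB arr d done dp →
      pvInvB arr d order (todo.foldl (p1340_step arr d) dp) := by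
  intro todo
  induction todo with
  | nil => intro done dp he hinv; rw [List.foldl_nil]; rw [List.append_nil] at he; rw [he]; exact hinv
  | cons i t iht =>
    intro done dp he hinv
    have hi : i < arr.length := hsub i (by rw [he]; simp)
    -- the value written at i is 1 + max over pvReach of the stored dp values
    have hstep : p1340_step arr d dp i
        = dp.set i (1 + (pvReach arr d i).foldl (fun b jj => max b (dp.getD jj 1)) 0) := by
      rw [p1340_step, p1340_scanR_eq, p1340_scanL_eq _ _ _ _ _ _ (by omega), pvReach,
        List.foldl_append]
    -- every reachable index was already processed
    have hdone : ∀ jj ∈ pvReach arr d i, jj ∈ done := by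
      intro jj hjj
      obtain ⟨hjl, hjv⟩ := pv_mem_reach arr d i jj hjj
      have hjo : jj ∈ done ++ i :: t := by rw [← he]; exact hmem jj hjl
      have hpt : (i :: t).Pairwise (fun a b => arr.getD a 0 ≤ arr.getD b 0) := by
        rw [he] at hpair
        exact (List.pairwise_append.1 hpair).2.1
      rcases List.mem_append.1 hjo with h | h
      · exact h
      · rcases List.mem_cons.1 h with rfl | h
        · exact absurd hjv (lt_irrefl _)
        · exact absurd hjv (not_lt.2 ((List.pairwise_cons.1 hpt).1 jj h))
    have hvals : (pvReach arr d i).foldl (fun b jj => max b (dp.getD jj 1)) 0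
        = ((pvReach arr d i).map (pvF arr d)).foldl max 0 := by
      rw [List.foldl_map]
      apply PySem.List.foldl_congr_mem
      intro acc x hx
      have hxl := (pv_mem_reach arr d i x hx).1
      rw [hinv.2 x hxl, if_pos (hdone x hx)]
    have hwrite : p1340_step arr d dp i = dp.set i (pvF arr d i) := by
      rw [hstep, hvals, ← pvF_eq]
    apply iht (done ++ [i]) _ (by rw [he]; simp)
    constructor
    · rw [hwrite, List.length_set]; exact hinv.1
    · intro k hk
      by_cases hki : k = i
      · subst hki
        rw [hwrite, pv_getD_set_self _ _ _ _ (by rw [hinv.1]; exact hk)]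
        simp
      · rw [hwrite, pv_getD_set_ne _ _ _ _ _ hki, hinv.2 k hk]
        have : (k ∈ done ++ [i]) ↔ k ∈ done := by simp [hki]
        simp only [this]

theorem p1340_dpB (arr : List Int) (d : Int) :
    (PySem.List.sorted (List.range arr.length) (fun k => arr.getD k 0) false).foldl
        (p1340_step arr d) (List.replicate arr.length 1)
      = (List.range arr.length).map (pvF arr d) := by
  set order := PySem.List.sorted (List.range arr.length) (fun k => arr.getD k 0) false with ho
  have hmem : ∀ k, k < arr.length → k ∈ order := by
    intro k hk
    rw [ho, PySem.List.mem_sorted]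
    exact List.mem_range.2 hk
  have hsub : ∀ k ∈ order, k < arr.length := by
    intro k hk
    rw [ho, PySem.List.mem_sorted] at hk
    exact List.mem_range.1 hk
  have hres := p1340_foldB arr d order hmem
    (PySem.List.sorted_pairwise (List.range arr.length) (fun k => arr.getD k 0)) hsub
    order [] (List.replicate arr.length 1) rfl
    ⟨List.length_replicate, fun k hk => by
      rw [pv_getD_replicate _ _ _ _ hk]; simp⟩
  apply List.ext_getElem
  · rw [hres.1]; simp
  · intro i hi hi'
    have hin : i < arr.length := by rw [hres.1] at hi; exact hi
    have := hres.2 i hin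
    rw [if_pos (hmem i hin), List.getD_eq_getElem _ _ hi] at this
    rw [this]
    simp [hin]

-- for a singleton list the dp value is 1 (both scans stop immediately)
theorem pvF_singleton (arr : List Int) (d : Int) (h : arr.length = 1) : pvF arr d 0 = 1 := by
  have hR : p1340_reachR arr 0 d.toNat 1 = [] := by
    cases d.toNat with
    | zero => rfl
    | succ s => rw [p1340_reachR, if_neg (by omega)]
  have hL : p1340_reachL arr 0 d.toNat (-1) = [] := by
    cases d.toNat with
    | zero => rfl
    | succ s => rw [p1340_reachL, if_neg (by intro hc; omega)]
  rw [pvF_eq, pvReach]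
  norm_num [hR, hL]

-- ===== VERDICT (by name: the statement is the Claim_ definition above) =====
theorem p1340_spec : Claim_equal_p1340 := by
  intro arr d _ hpre
  unfold Spec_p1340 p1340 p1340_alt
  simp only [p1340_dpA, p1340_dpB]
  by_cases h1 : arr.length = 1
  · rw [if_pos (by simp [h1])]
    rw [h1]
    simp only [List.range_one, List.map_cons, List.map_nil]
    rw [PySem.List.max?_id_cons]
    simp [pvF_singleton arr d h1]
  · rw [if_neg (by simp [h1])]
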